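-- pv_equiv track=rewrite | github.com/ilmenit/pokey-stream-player | src/stream_player/simple_mads/parser.py | split_data_args
-- ===== SOURCE A (Python) =====
-- def split_data_args(s):
--     """Split comma-separated args respecting parentheses."""
--     parts, depth, cur = [], 0, []
--     for c in s:
--         if c == '(':   depth += 1
--         elif c == ')': depth -= 1
--         elif c == ',' and depth == 0:
--             parts.append(''.join(cur).strip())
--             cur = []
--             continue
--         cur.append(c)
--     tail = ''.join(cur).strip()
--     if tail:
--         parts.append(tail)
--     return tuple(parts)
-- ===== SOURCE B (Python) =====
-- def split_data_args(s):
--     """Split comma-separated args respecting parentheses."""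
--     segs, depth, start = [], 0, 0
--     for i, c in enumerate(s):
--         if c == '(':
--             depth += 1
--         elif c == ')':
--             depth -= 1
--         elif c == ',' and depth == 0:
--             segs.append(s[start:i])
--             start = i + 1
--     segs.append(s[start:])
--     parts = [seg.strip() for seg in segs]
--     if parts and parts[-1] == '':
--         parts.pop()
--     return tuple(parts)
-- ===== Notes on version B (the rewrite author's own statement) =====
-- stated objective: simpler
-- what changed: B records split positions and slices the string per segment instead of accumulating and joining a per-character buffer, then strips segments in a separate pass and drops a trailing empty part once at the end.
import Mathlib
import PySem

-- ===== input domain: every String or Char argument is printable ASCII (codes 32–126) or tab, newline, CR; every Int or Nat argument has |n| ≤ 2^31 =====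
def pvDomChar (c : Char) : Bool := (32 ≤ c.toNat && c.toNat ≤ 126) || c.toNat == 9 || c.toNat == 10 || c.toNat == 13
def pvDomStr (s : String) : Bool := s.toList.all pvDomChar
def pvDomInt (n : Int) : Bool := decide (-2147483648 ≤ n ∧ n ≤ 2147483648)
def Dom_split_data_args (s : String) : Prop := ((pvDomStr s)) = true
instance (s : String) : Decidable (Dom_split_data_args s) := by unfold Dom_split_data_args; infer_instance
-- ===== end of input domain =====

-- B keeps the one depth-tracking scan but records split positions and slices the string,
-- instead of accumulating and joining a per-character buffer; objective: simpler.


-- ===== PORT A =====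
-- loop state: (parts, depth, cur)
def pvStepA (st : List String × Int × List Char) (c : Char) : List String × Int × List Char :=
  if c = '(' then (st.1, st.2.1 + 1, st.2.2 ++ [c])
  else if c = ')' then (st.1, st.2.1 - 1, st.2.2 ++ [c])
  else if c = ',' ∧ st.2.1 = 0 then
    (st.1 ++ [String.ofList (PySem.Chars.strip st.2.2)], st.2.1, [])
  else (st.1, st.2.1, st.2.2 ++ [c])

def split_data_args (s : String) : List String :=
  let st := s.toList.foldl pvStepA ([], 0, [])
  let tail := PySem.Chars.strip st.2.2
  if tail ≠ [] then st.1 ++ [String.ofList tail] else st.1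

-- ===== PORT B =====
-- loop state: (segs, depth, start); segs holds the raw slices s[start:i]
def pvStepB (l : List Char) (st : List (List Char) × Int × Int) (p : Int × Char) :
    List (List Char) × Int × Int :=
  if p.2 = '(' then (st.1, st.2.1 + 1, st.2.2)
  else if p.2 = ')' then (st.1, st.2.1 - 1, st.2.2)
  else if p.2 = ',' ∧ st.2.1 = 0 then
    (st.1 ++ [PySem.List.slice l (some st.2.2) (some p.1)], st.2.1, p.1 + 1)
  else st

def split_data_args_alt (s : String) : List String :=
  let l := s.toList
  let st := (PySem.List.enumerate l 0).foldl (pvStepB l) ([], 0, 0)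
  let segs := st.1 ++ [PySem.List.slice l (some st.2.2) none]
  let parts := segs.map (fun seg => String.ofList (PySem.Chars.strip seg))
  -- 'if parts and parts[-1] == "": parts.pop()'  (getLast? = none exactly when parts is empty)
  if parts.getLast? = some "" then parts.dropLast else parts

-- ===== PRECONDITION & SPEC =====
def Spec_split_data_args (s : String) (out : List String) : Prop := out = split_data_args_alt s
instance (s : String) (out : List String) : Decidable (Spec_split_data_args s out) := by unfold Spec_split_data_args; infer_instance

-- ===== CLAIM (what is proved, stated in full; the proofs are below) =====
def Claim_equal_split_data_args : Prop := ∀ (s : String), Dom_split_data_args s → Spec_split_data_args s (split_data_args s)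

-- ===== LEMMAS AND PROOFS =====

def pvStripJ (seg : List Char) : String := String.ofList (PySem.Chars.strip seg)

lemma pv_take_snoc (l : List Char) (start i : Nat) (c : Char) (h : start ≤ i)
    (hc : l[i]? = some c) :
    (l.drop start).take (i - start) ++ [c] = (l.drop start).take (i + 1 - start) := by
  have h1 : i + 1 - start = (i - start) + 1 := by omega
  rw [h1, List.take_add_one, List.getElem?_drop]
  have h2 : start + (i - start) = i := by omega
  rw [h2, hc]
  rfl

lemma pv_loop_inv (l : List Char) :
    ∀ (rest : List Char) (i start : Nat) (segs : List (List Char)) (d : Int),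
    start ≤ i → l.drop i = rest →
    0 ≤ (List.foldl (pvStepB l) (segs, d, (start:Int)) (PySem.List.enumerate rest (i:Int))).2.2 ∧
    List.foldl pvStepA (segs.map pvStripJ, d, (l.drop start).take (i - start)) rest
      = ((List.foldl (pvStepB l) (segs, d, (start:Int)) (PySem.List.enumerate rest (i:Int))).1.map pvStripJ,
         (List.foldl (pvStepB l) (segs, d, (start:Int)) (PySem.List.enumerate rest (i:Int))).2.1,
         l.drop (List.foldl (pvStepB l) (segs, d, (start:Int)) (PySem.List.enumerate rest (i:Int))).2.2.toNat) := by
  intro rest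
  induction rest with
  | nil =>
    intro i start segs d hle hdrop
    simp only [PySem.List.enumerate_nil, List.foldl_nil]
    constructor
    · simp
    · have hlen : l.length ≤ i := by
        by_contra h
        have h2 := List.drop_eq_nil_iff.mp hdrop
        omega
      have htake : (l.drop start).take (i - start) = l.drop start := by
        apply List.take_of_length_le
        simp
        omega
      simp [htake, Int.toNat_natCast]
  | cons c rest ih =>
    intro i start segs d hle hdrop
    have hi : i < l.length := by
      rcases Nat.lt_or_ge i l.length with h | h
      · exact h
      · rw [List.drop_eq_nil_of_le h] at hdrop
        exact absurd hdrop (by simp)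
    have hci : l[i]? = some c := by
      have h := congrArg (fun t : List Char => t[0]?) hdrop
      simpa [List.getElem?_drop] using h
    have hdrop' : l.drop (i + 1) = rest := by
      have h := congrArg List.tail hdrop
      simpa [List.tail_drop] using h
    have hcast : (i : Int) + 1 = ((i + 1 : Nat) : Int) := by push_cast; ring
    rw [PySem.List.enumerate_cons]
    simp only [List.foldl_cons]
    by_cases h1 : c = '('
    · have hA : pvStepA (segs.map pvStripJ, d, (l.drop start).take (i - start)) c
          = (segs.map pvStripJ, d + 1, (l.drop start).take (i + 1 - start)) := by
        simp [pvStepA, h1]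
        exact pv_take_snoc l start i '(' hle (h1 ▸ hci)
      have hB : pvStepB l (segs, d, (start:Int)) ((i:Int), c)
          = (segs, d + 1, (start:Int)) := by
        simp [pvStepB, h1]
      rw [hA, hB, hcast]
      exact ih (i + 1) start segs (d + 1) (by omega) hdrop'
    · by_cases h2 : c = ')'
      · have hA : pvStepA (segs.map pvStripJ, d, (l.drop start).take (i - start)) c
            = (segs.map pvStripJ, d - 1, (l.drop start).take (i + 1 - start)) := by
          simp [pvStepA, h2]
          exact pv_take_snoc l start i ')' hle (h2 ▸ hci)
        have hB : pvStepB l (segs, d, (start:Int)) ((i:Int), c)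
            = (segs, d - 1, (start:Int)) := by
          simp [pvStepB, h2]
        rw [hA, hB, hcast]
        exact ih (i + 1) start segs (d - 1) (by omega) hdrop'
      · by_cases h3 : c = ',' ∧ d = 0
        · have hA : pvStepA (segs.map pvStripJ, d, (l.drop start).take (i - start)) c
              = ((segs ++ [(l.drop start).take (i - start)]).map pvStripJ, d,
                 (l.drop (i + 1)).take ((i + 1) - (i + 1))) := by
            simp [pvStepA, h3.1, h3.2, pvStripJ]
          have hB : pvStepB l (segs, d, (start:Int)) ((i:Int), c)
              = (segs ++ [(l.drop start).take (i - start)], d, (i:Int) + 1) := by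
            simp [pvStepB, h3.1, h3.2, PySem.List.slice_natCast]
          rw [hA, hB, hcast]
          exact ih (i + 1) (i + 1) (segs ++ [(l.drop start).take (i - start)]) d
            (by omega) hdrop'
        · have hA : pvStepA (segs.map pvStripJ, d, (l.drop start).take (i - start)) c
              = (segs.map pvStripJ, d, (l.drop start).take (i + 1 - start)) := by
            have h3' : ¬(c = ',' ∧ (segs.map pvStripJ, d, (l.drop start).take (i - start)).2.1 = 0) := h3
            simp [pvStepA, h1, h2, h3']
            exact pv_take_snoc l start i c hle hci
          have hB : pvStepB l (segs, d, (start:Int)) ((i:Int), c)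
              = (segs, d, (start:Int)) := by
            have h3' : ¬(((i:Int), c).2 = ',' ∧ ((segs, d, (start:Int)) : List (List Char) × Int × Int).2.1 = 0) := h3
            simp [pvStepB, h1, h2, h3']
          rw [hA, hB, hcast]
          exact ih (i + 1) start segs d (by omega) hdrop'

lemma pv_ofList_eq_empty {cs : List Char} (h : String.ofList cs = "") : cs = [] := by
  have := congrArg String.toList h
  simpa using this

-- ===== VERDICT (by name: the statement is the Claim_ definition above) =====
theorem split_data_args_spec : Claim_equal_split_data_args := by
  intro s _
  unfold Spec_split_data_args
  obtain ⟨hnn, hinv⟩ := pv_loop_inv s.toList s.toList 0 0 [] 0 (le_refl 0) (by simp)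
  simp only [Nat.cast_zero, List.drop_zero, Nat.sub_self, List.take_zero, List.map_nil]
    at hnn hinv
  show (let st := List.foldl pvStepA ([], 0, []) s.toList;
        let tail := PySem.Chars.strip st.2.2;
        if tail ≠ [] then st.1 ++ [String.ofList tail] else st.1)
      = (let l := s.toList;
         let st := List.foldl (pvStepB l) ([], 0, 0) (PySem.List.enumerate l 0);
         let segs := st.1 ++ [PySem.List.slice l (some st.2.2) none];
         let parts := segs.map (fun seg => String.ofList (PySem.Chars.strip seg));
         if parts.getLast? = some "" then parts.dropLast else parts)
  simp only [] -- zeta-reduce the lets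
  rw [hinv]
  set st := List.foldl (pvStepB s.toList) ([], 0, 0) (PySem.List.enumerate s.toList 0) with hst
  dsimp only
  rw [PySem.List.slice_from _ hnn]
  rw [List.map_append]
  simp only [List.map_cons, List.map_nil]
  rw [List.getLast?_concat]
  by_cases htail : PySem.Chars.strip (s.toList.drop st.2.2.toNat) = []
  · simp [htail, pvStripJ]
  · have hne : String.ofList (PySem.Chars.strip (s.toList.drop st.2.2.toNat)) ≠ "" := by
      intro h
      exact htail (pv_ofList_eq_empty h)
    simp [htail, pvStripJ, hne]
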